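-- pv_equiv track=rewrite | github.com/armishra111/Loop-TNR | loss_function.py | get_allowed_quadruples
-- ===== SOURCE A (Python) =====
-- def get_allowed_quadruples(allowed_pairs, vertical_allowed_pairs):
--     vertical = set(vertical_allowed_pairs)
--     if not vertical or not allowed_pairs:
--         return set()
--
--     allowed_quadruples = set()
--     for (A, B) in allowed_pairs:
--         for (D, E) in allowed_pairs:
--             if (A, D) in vertical and (B, E) in vertical:
--                 allowed_quadruples.add((A, B, D, E))
--
--     return allowed_quadruples
-- ===== SOURCE B (Python) =====
-- def get_allowed_quadruples(allowed_pairs, vertical_allowed_pairs):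
--     vertical = set(vertical_allowed_pairs)
--     # index once: for each distinct left value A, the (D, E) pairs with (A, D) vertical
--     cand = {}
--     for (A, _) in allowed_pairs:
--         if A not in cand:
--             cand[A] = [(D, E) for (D, E) in allowed_pairs if (A, D) in vertical]
--     result = set()
--     for (A, B) in allowed_pairs:
--         for (D, E) in cand[A]:
--             if (B, E) in vertical:
--                 result.add((A, B, D, E))
--     return result
-- ===== Notes on version B (the rewrite author's own statement) =====
-- stated objective: alternative
-- what changed: Instead of scanning all P x P pairs of allowed pairs with both vertical tests inside, B precomputes an index keyed by each distinct left value A holding the (D,E) pairs with (A,D) vertical, and the join then iterates only over those pre-filtered candidate lists with a single vertical test.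
import Mathlib
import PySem

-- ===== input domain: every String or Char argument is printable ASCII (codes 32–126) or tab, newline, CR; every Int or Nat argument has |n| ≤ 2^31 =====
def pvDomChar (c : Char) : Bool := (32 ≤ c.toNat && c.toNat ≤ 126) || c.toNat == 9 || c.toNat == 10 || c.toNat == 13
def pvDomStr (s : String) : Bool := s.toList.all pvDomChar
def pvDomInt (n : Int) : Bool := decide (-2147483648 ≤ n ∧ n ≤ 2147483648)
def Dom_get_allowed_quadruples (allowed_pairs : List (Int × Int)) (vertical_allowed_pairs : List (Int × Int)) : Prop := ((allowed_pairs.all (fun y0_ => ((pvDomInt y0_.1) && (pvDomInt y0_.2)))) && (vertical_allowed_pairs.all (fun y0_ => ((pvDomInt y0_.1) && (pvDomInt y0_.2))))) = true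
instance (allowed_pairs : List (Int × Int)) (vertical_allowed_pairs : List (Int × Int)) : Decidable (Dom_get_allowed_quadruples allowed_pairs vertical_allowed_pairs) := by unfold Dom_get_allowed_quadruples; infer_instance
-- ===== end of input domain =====

-- B replaces A's full P×P double scan by an index built once per distinct left value
-- (the (D,E) candidates already vertical-compatible with it), then joins only over those
-- pre-filtered candidate lists (alternative decomposition, same worst-case cost;
-- neither version mutates its arguments).

-- ===== PORT A =====
def get_allowed_quadruples (allowed_pairs : List (Int × Int)) (vertical_allowed_pairs : List (Int × Int)) : List (Int × Int × Int × Int) :=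
  let vertical : PySem.Set (Int × Int) := PySem.Set.ofList vertical_allowed_pairs
  if vertical = [] ∨ allowed_pairs = [] then
    []
  else
    allowed_pairs.foldl (fun acc p =>
      allowed_pairs.foldl (fun acc2 q =>
        if PySem.Set.contains vertical (p.1, q.1) && PySem.Set.contains vertical (p.2, q.2) then
          PySem.Set.add acc2 (p.1, p.2, q.1, q.2)
        else acc2) acc)
      PySem.Set.empty

-- ===== PORT B =====
def get_allowed_quadruples_alt (allowed_pairs : List (Int × Int)) (vertical_allowed_pairs : List (Int × Int)) : List (Int × Int × Int × Int) :=
  let vertical : PySem.Set (Int × Int) := PySem.Set.ofList vertical_allowed_pairs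
  let cand : PySem.Dict Int (List (Int × Int)) :=
    allowed_pairs.foldl (fun d p =>
      if PySem.Dict.contains d p.1 then d
      else PySem.Dict.insert d p.1
        (allowed_pairs.filter (fun q => PySem.Set.contains vertical (p.1, q.1))))
      PySem.Dict.empty
  allowed_pairs.foldl (fun acc p =>
    (PySem.Dict.getD cand p.1 []).foldl (fun acc2 q =>
      if PySem.Set.contains vertical (p.2, q.2) then
        PySem.Set.add acc2 (p.1, p.2, q.1, q.2)
      else acc2) acc)
    PySem.Set.empty

-- ===== PRECONDITION & SPEC =====
def Spec_get_allowed_quadruples (allowed_pairs : List (Int × Int)) (vertical_allowed_pairs : List (Int × Int)) (out : List (Int × Int × Int × Int)) : Prop := out = get_allowed_quadruples_alt allowed_pairs vertical_allowed_pairs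
instance (allowed_pairs : List (Int × Int)) (vertical_allowed_pairs : List (Int × Int)) (out : List (Int × Int × Int × Int)) : Decidable (Spec_get_allowed_quadruples allowed_pairs vertical_allowed_pairs out) := by unfold Spec_get_allowed_quadruples; infer_instance

-- ===== CLAIM (what is proved, stated in full; the proofs are below) =====
def Claim_equal_get_allowed_quadruples : Prop := ∀ (allowed_pairs : List (Int × Int)) (vertical_allowed_pairs : List (Int × Int)), Dom_get_allowed_quadruples allowed_pairs vertical_allowed_pairs → Spec_get_allowed_quadruples allowed_pairs vertical_allowed_pairs (get_allowed_quadruples allowed_pairs vertical_allowed_pairs)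

-- ===== LEMMAS AND PROOFS =====

-- B's inner loop over a pre-filtered list equals A's inner loop over the whole list
-- with the conjunction of both guards.
lemma pvFilterFoldlGuard {α β : Type} (p₁ p₂ : α → Bool) (g : β → α → β) :
    ∀ (xs : List α) (acc : β),
      (xs.filter p₁).foldl (fun a q => if p₂ q then g a q else a) acc
        = xs.foldl (fun a q => if p₁ q && p₂ q then g a q else a) acc := by
  intro xs
  induction xs with
  | nil => intro acc; rfl
  | cons x xs ih =>
    intro acc
    by_cases h1 : p₁ x = true
    · by_cases h2 : p₂ x = true <;> simp [List.filter_cons, h1, h2, ih]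
    · simp only [Bool.not_eq_true] at h1
      simp [List.filter_cons, h1, ih]

lemma pvDictContainsIsSome {ν : Type} (d : PySem.Dict Int ν) (k : Int) :
    PySem.Dict.contains d k = (PySem.Dict.get? d k).isSome := by
  simp only [PySem.Dict.contains, PySem.Dict.get?, Option.isSome_map]
  rw [Bool.eq_iff_iff]
  simp [List.any_eq, List.find?_isSome]

-- The index-building fold: every key already seen maps to its filtered candidate list.
lemma pvCandFoldGet {ν : Type} (filt : Int → ν) :
    ∀ (l : List (Int × Int)) (d : PySem.Dict Int ν) (ks : List Int),
      (∀ k, PySem.Dict.get? d k = if k ∈ ks then some (filt k) else none) →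
      ∀ k, PySem.Dict.get?
          (l.foldl (fun d p => if PySem.Dict.contains d p.1 then d
                               else PySem.Dict.insert d p.1 (filt p.1)) d) k
        = if k ∈ ks ∨ k ∈ l.map Prod.fst then some (filt k) else none := by
  intro l
  induction l with
  | nil => intro d ks h k; simp [h k]
  | cons p l ih =>
    intro d ks h k
    by_cases hp : p.1 ∈ ks
    · have hc : PySem.Dict.contains d p.1 = true := by
        rw [pvDictContainsIsSome, h p.1]; simp [hp]
      simp only [List.foldl_cons, hc, if_true]
      rw [ih d ks h k]
      have hiff : (k ∈ ks ∨ k ∈ List.map Prod.fst l) ↔ (k ∈ ks ∨ k ∈ p.1 :: List.map Prod.fst l) := by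
        simp only [List.mem_cons]
        constructor
        · tauto
        · rintro (h1 | h1 | h1)
          · tauto
          · subst h1; exact Or.inl hp
          · tauto
      simp only [List.map_cons]
      by_cases hcond : k ∈ ks ∨ k ∈ List.map Prod.fst l
      · rw [if_pos hcond, if_pos (hiff.mp hcond)]
      · rw [if_neg hcond, if_neg (fun hc => hcond (hiff.mpr hc))]
    · have hc : PySem.Dict.contains d p.1 = false := by
        rw [pvDictContainsIsSome, h p.1]; simp [hp]
      simp only [List.foldl_cons, hc, Bool.false_eq_true, if_false]
      have h' : ∀ k, PySem.Dict.get? (PySem.Dict.insert d p.1 (filt p.1)) k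
          = if k ∈ ks ++ [p.1] then some (filt k) else none := by
        intro k
        by_cases hk : k = p.1
        · subst hk; simp [PySem.Dict.get?_insert_self, hp]
        · rw [PySem.Dict.get?_insert_of_ne d _ hk, h k]
          simp [hk]
      rw [ih _ (ks ++ [p.1]) h' k]
      have hiff2 : (k ∈ ks ++ [p.1] ∨ k ∈ List.map Prod.fst l) ↔ (k ∈ ks ∨ k ∈ p.1 :: List.map Prod.fst l) := by
        simp only [List.mem_append, List.mem_cons, List.not_mem_nil, or_false]
        tauto
      simp only [List.map_cons]
      by_cases hcond2 : k ∈ ks ++ [p.1] ∨ k ∈ List.map Prod.fst l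
      · rw [if_pos hcond2, if_pos (hiff2.mp hcond2)]
      · rw [if_neg hcond2, if_neg (fun hc => hcond2 (hiff2.mpr hc))]

-- A's double loop with the empty vertical set adds nothing.
lemma pvDoubleLoopNilVert (ap : List (Int × Int)) :
    (ap.foldl (fun acc p =>
      ap.foldl (fun acc2 q =>
        if PySem.Set.contains ([] : PySem.Set (Int × Int)) (p.1, q.1)
            && PySem.Set.contains ([] : PySem.Set (Int × Int)) (p.2, q.2) then
          PySem.Set.add acc2 (p.1, p.2, q.1, q.2)
        else acc2) acc)
      PySem.Set.empty) = ([] : List (Int × Int × Int × Int)) := by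
  simp [PySem.Set.contains_eq_listContains, List.foldl_fixed, PySem.Set.empty]

-- B equals A's (unguarded) double loop.
lemma pvMainEq (ap vap : List (Int × Int)) :
    get_allowed_quadruples_alt ap vap
      = ap.foldl (fun acc p =>
          ap.foldl (fun acc2 q =>
            if PySem.Set.contains (PySem.Set.ofList vap) (p.1, q.1)
                && PySem.Set.contains (PySem.Set.ofList vap) (p.2, q.2) then
              PySem.Set.add acc2 (p.1, p.2, q.1, q.2)
            else acc2) acc)
          PySem.Set.empty := by
  unfold get_allowed_quadruples_alt
  apply PySem.List.foldl_congr_mem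
  intro acc p hp
  have hget := pvCandFoldGet
      (fun a => ap.filter (fun q => PySem.Set.contains (PySem.Set.ofList vap) (a, q.1)))
      ap PySem.Dict.empty []
      (by intro k; simp [PySem.Dict.get?, PySem.Dict.empty]) p.1
  have hmem : p.1 ∈ ap.map Prod.fst := List.mem_map_of_mem hp
  rw [PySem.Dict.getD, hget]
  simp only [hmem, or_true, if_true, Option.getD_some]
  exact pvFilterFoldlGuard _ _ _ ap acc

-- ===== VERDICT (by name: the statement is the Claim_ definition above) =====
theorem get_allowed_quadruples_spec : Claim_equal_get_allowed_quadruples := by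
  intro ap vap _
  unfold Spec_get_allowed_quadruples
  rw [pvMainEq]
  unfold get_allowed_quadruples
  by_cases hap : ap = []
  · subst hap; simp
  · by_cases hv : PySem.Set.ofList vap = ([] : List (Int × Int))
    · simp only [hv, true_or, if_true]
      exact (pvDoubleLoopNilVert ap).symm
    · simp [hv, hap]
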